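-- pv_equiv track=rewrite | github.com/Gnidleif/bad_scripts | calc.py | handleInt
-- ===== SOURCE A (Python) =====
-- def handleInt(num):
--     calc = [b for b in bin(num).split('0b')[1]]
--     if len(calc) >= 2:
--         index = int(len(calc) / 2)
--         if calc[0] != calc[index]:
--             calc[0], calc[index] = calc[index], calc[0]
--         else:
--             calc[index] = '1' if calc[index] == '0' else '0'
--     else:
--         calc[0] = '1' if calc[0] == '0' else '0'
--     return int("0b{}".format("".join(calc)), 2)
-- ===== SOURCE B (Python) =====
-- def handleInt(num):
--     m = abs(num)
--     if m == 0:
--         return 1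
--     L = m.bit_length()
--     if L == 1:
--         return m ^ 1
--     p = (L - 1) - (L // 2)
--     if (m >> p) & 1:
--         return m - (1 << p)
--     return m - (1 << (L - 1)) + (1 << p)
-- ===== Notes on version B (the rewrite author's own statement) =====
-- stated objective: idiomatic
-- what changed: Replaced the char-list manipulation of bin(num)'s string (split, swap/flip characters, re-parse with int(...,2)) by pure integer bit arithmetic: bit_length, shifts and masks compute the same clear-MSB/set-or-clear-middle-bit result without any string conversion.
import Mathlib
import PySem

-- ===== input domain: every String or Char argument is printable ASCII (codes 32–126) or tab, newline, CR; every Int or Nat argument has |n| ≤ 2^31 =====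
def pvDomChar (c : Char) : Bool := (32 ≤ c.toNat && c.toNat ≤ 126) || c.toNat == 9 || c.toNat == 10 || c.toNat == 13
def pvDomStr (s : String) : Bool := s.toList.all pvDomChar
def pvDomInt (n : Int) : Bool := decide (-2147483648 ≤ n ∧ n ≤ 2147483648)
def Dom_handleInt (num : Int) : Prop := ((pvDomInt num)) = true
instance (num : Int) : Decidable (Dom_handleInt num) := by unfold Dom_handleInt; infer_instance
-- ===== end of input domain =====

-- B replaces A's char-list surgery on bin(num) by integer bit arithmetic (bit_length, shifts, masks); no string conversion.

-- ===== PORT A =====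
-- little-endian binary digits of a Nat ('1'/'0' chars), LSB first; [] for 0
def digsLE : Nat → List Char
  | 0 => []
  | n + 1 => (if (n + 1) % 2 = 1 then '1' else '0') :: digsLE ((n + 1) / 2)
decreasing_by exact Nat.div_lt_self (Nat.succ_pos n) (by omega)

-- exact port of the builtin `bin(num).split('0b')[1]` as a char list: binary digits of |num|,
-- MSB first, "0" for 0 (bin drops the sign before '0b', so only |num| matters)
def binChars (m : Nat) : List Char := if m = 0 then ['0'] else (digsLE m).reverse

-- exact port of `int("0b"+s, 2)` on a list of '0'/'1' chars
def parseBE (l : List Char) : Nat := l.foldl (fun acc c => 2 * acc + (if c = '1' then 1 else 0)) 0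

def handleInt (num : Int) : Int :=
  let cl := binChars num.natAbs
  if cl.length ≥ 2 then
    -- int(len(calc)/2): true division then truncation = floor division for these small lengths
    let index := cl.length / 2
    if cl[0]! ≠ cl[index]! then
      Int.ofNat (parseBE ((cl.set 0 cl[index]!).set index cl[0]!))
    else
      Int.ofNat (parseBE (cl.set index (if cl[index]! = '0' then '1' else '0')))
  else
    Int.ofNat (parseBE (cl.set 0 (if cl[0]! = '0' then '1' else '0')))

-- ===== PORT B =====
-- port of Python's m.bit_length()
def bitLen : Nat → Nat
  | 0 => 0
  | n + 1 => bitLen ((n + 1) / 2) + 1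
decreasing_by exact Nat.div_lt_self (Nat.succ_pos n) (by omega)

def handleInt_alt (num : Int) : Int :=
  let m := num.natAbs
  if m = 0 then 1
  else
    let L := bitLen m
    if L = 1 then Int.ofNat (m ^^^ 1)
    else
      let p := (L - 1) - (L / 2)
      -- Nat subtraction below is exact: the subtracted bit is always set in m
      if (m >>> p) &&& 1 = 1 then Int.ofNat (m - (1 <<< p))
      else Int.ofNat (m - (1 <<< (L - 1)) + (1 <<< p))

-- ===== PRECONDITION & SPEC =====
def Spec_handleInt (num : Int) (out : Int) : Prop := out = handleInt_alt num
instance (num : Int) (out : Int) : Decidable (Spec_handleInt num out) := by unfold Spec_handleInt; infer_instance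

-- ===== CLAIM (what is proved, stated in full; the proofs are below) =====
def Claim_equal_handleInt : Prop := ∀ (num : Int), Dom_handleInt num → Spec_handleInt num (handleInt num)

-- ===== LEMMAS AND PROOFS =====

-- little-endian value of a digit list
def parseLE : List Char → Nat
  | [] => 0
  | c :: cs => (if c = '1' then 1 else 0) + 2 * parseLE cs

lemma digsLE_zero : digsLE 0 = [] := by rw [digsLE]

lemma digsLE_pos (m : Nat) (h : m ≠ 0) :
    digsLE m = (if m % 2 = 1 then '1' else '0') :: digsLE (m / 2) := by
  obtain ⟨k, rfl⟩ := Nat.exists_eq_succ_of_ne_zero h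
  rw [digsLE]

lemma bitLen_zero : bitLen 0 = 0 := by rw [bitLen]

lemma bitLen_pos (m : Nat) (h : m ≠ 0) : bitLen m = bitLen (m / 2) + 1 := by
  obtain ⟨k, rfl⟩ := Nat.exists_eq_succ_of_ne_zero h
  rw [bitLen]

lemma parseLE_append (xs ys : List Char) :
    parseLE (xs ++ ys) = parseLE xs + 2 ^ xs.length * parseLE ys := by
  induction xs with
  | nil => simp [parseLE]
  | cons c cs ih => simp [parseLE, ih, pow_succ]; ring

lemma parseBE_aux (l : List Char) (a : Nat) :
    l.foldl (fun acc c => 2 * acc + (if c = '1' then 1 else 0)) a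
      = a * 2 ^ l.length + parseLE l.reverse := by
  induction l generalizing a with
  | nil => simp [parseLE]
  | cons c cs ih =>
      simp only [List.foldl_cons, ih, List.reverse_cons, parseLE_append, List.length_cons,
        List.length_reverse, parseLE, pow_succ]
      ring

lemma parseBE_eq (l : List Char) : parseBE l = parseLE l.reverse := by
  simp [parseBE, parseBE_aux]

lemma parseLE_digsLE (m : Nat) : parseLE (digsLE m) = m := by
  induction m using Nat.strong_induction_on with
  | _ m ih =>
    rcases Nat.eq_zero_or_pos m with h | h
    · simp [h, digsLE_zero, parseLE]
    · rw [digsLE_pos m (by omega), parseLE, ih (m / 2) (Nat.div_lt_self h (by omega))]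
      rcases Nat.mod_two_eq_zero_or_one m with h2 | h2 <;> simp [h2] <;> omega

lemma length_digsLE (m : Nat) : (digsLE m).length = bitLen m := by
  induction m using Nat.strong_induction_on with
  | _ m ih =>
    rcases Nat.eq_zero_or_pos m with h | h
    · simp [h, digsLE_zero, bitLen_zero]
    · rw [digsLE_pos m (by omega), bitLen_pos m (by omega), List.length_cons,
        ih (m / 2) (Nat.div_lt_self h (by omega))]

lemma getElem?_digsLE (m j : Nat) (hj : j < (digsLE m).length) :
    (digsLE m)[j]? = some (if m.testBit j then '1' else '0') := by
  induction m using Nat.strong_induction_on generalizing j with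
  | _ m ih =>
    rcases Nat.eq_zero_or_pos m with h | h
    · simp [h, digsLE_zero] at hj
    · rw [digsLE_pos m (by omega)] at hj ⊢
      cases j with
      | zero => simp [Nat.testBit_zero]
      | succ j =>
          simp only [List.getElem?_cons_succ, List.length_cons] at hj ⊢
          rw [ih (m / 2) (Nat.div_lt_self h (by omega)) j (by omega), Nat.testBit_add_one]

lemma parseLE_set_to0 (l : List Char) (j : Nat) (h : l[j]? = some '1') :
    parseLE (l.set j '0') + 2 ^ j = parseLE l := by
  induction l generalizing j with
  | nil => simp at h
  | cons d ds ih =>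
      cases j with
      | zero =>
          simp only [List.getElem?_cons_zero, Option.some.injEq] at h
          subst h
          simp [parseLE]; omega
      | succ j =>
          simp only [List.getElem?_cons_succ] at h
          have := ih j h
          simp only [List.set_cons_succ, parseLE, pow_succ]
          omega

lemma parseLE_set_to1 (l : List Char) (j : Nat) (h : l[j]? = some '0') :
    parseLE (l.set j '1') = parseLE l + 2 ^ j := by
  induction l generalizing j with
  | nil => simp at h
  | cons d ds ih =>
      cases j with
      | zero =>
          simp only [List.getElem?_cons_zero, Option.some.injEq] at h
          subst h
          simp [parseLE]; omega
      | succ j =>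
          simp only [List.getElem?_cons_succ] at h
          have := ih j h
          simp only [List.set_cons_succ, parseLE, pow_succ]
          omega

lemma set_reverse (l : List Char) (i : Nat) (c : Char) (hi : i < l.length) :
    l.reverse.set i c = (l.set (l.length - 1 - i) c).reverse := by
  apply List.ext_getElem
  · simp
  · intro k hk hk'
    have hkl : k < l.length := by simpa using hk
    simp only [List.getElem_reverse, List.getElem_set, List.length_set]
    split_ifs <;> first | rfl | omega

lemma msb_true (m : Nat) (h : 1 ≤ m) : m.testBit (bitLen m - 1) = true := by
  induction m using Nat.strong_induction_on with
  | _ m ih =>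
    rcases Nat.lt_or_ge m 2 with h2 | h2
    · have hm1 : m = 1 := by omega
      subst hm1
      rw [bitLen_pos 1 (by omega), bitLen_zero]
      norm_num
    · rw [bitLen_pos m (by omega)]
      have hpos : 1 ≤ m / 2 := by omega
      have hlen : 1 ≤ bitLen (m / 2) := by
        rw [bitLen_pos _ (by omega)]; omega
      have he : bitLen (m / 2) + 1 - 1 = (bitLen (m / 2) - 1) + 1 := by omega
      rw [he, Nat.testBit_add_one]
      exact ih (m / 2) (Nat.div_lt_self (by omega) (by omega)) hpos

lemma bitLen_ge_two (m : Nat) (h : 2 ≤ m) : 2 ≤ bitLen m := by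
  rw [bitLen_pos m (by omega), bitLen_pos (m / 2) (by omega)]
  omega

lemma shift_and_eq (m p : Nat) : ((m >>> p) &&& 1 = 1) ↔ m.testBit p = true := by
  simp [Nat.testBit, Nat.shiftRight_eq_div_pow, Nat.and_one_is_mod]

lemma testBit_ge (m j : Nat) (hb : m.testBit j = true) : 2 ^ j ≤ m := by
  by_contra hc
  have := Nat.testBit_lt_two_pow (by omega : m < 2 ^ j)
  simp [this] at hb

lemma handleInt_eq_alt (num : Int) : handleInt num = handleInt_alt num := by
  simp only [handleInt, handleInt_alt]
  generalize num.natAbs = m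
  rcases Nat.lt_or_ge m 2 with hsm | h2
  · rcases (by omega : m = 0 ∨ m = 1) with rfl | rfl
    · norm_num [binChars, parseBE, parseLE]
    · have d1 : digsLE 1 = ['1'] := by
        rw [digsLE_pos 1 (by omega)]
        norm_num [digsLE_zero]
      have b1 : bitLen 1 = 1 := by rw [bitLen_pos 1 (by omega), bitLen_zero]
      norm_num [binChars, d1, b1, parseBE]
  · have hm0 : m ≠ 0 := by omega
    have hlen : (digsLE m).length = bitLen m := length_digsLE m
    set L := bitLen m with hLdef
    have hL2 : 2 ≤ L := bitLen_ge_two m h2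
    set i := L / 2 with hidef
    set p := L - 1 - i with hpdef
    have hiL : i < L := by omega
    have hi1 : 1 ≤ i := by omega
    have hpL : p < L := by omega
    have hpi : p ≠ L - 1 := by omega
    have hcalc : binChars m = (digsLE m).reverse := by rw [binChars, if_neg hm0]
    have hclen : (binChars m).length = L := by rw [hcalc, List.length_reverse, hlen]
    have hg0 : (binChars m)[0]! = (if m.testBit (L - 1) then '1' else '0') := by
      rw [hcalc, List.getElem!_eq_getElem?_getD,
        List.getElem?_reverse (by rw [hlen]; omega),
        getElem?_digsLE m _ (by omega), Option.getD_some, hlen]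
      norm_num
    have hgi : (binChars m)[i]! = (if m.testBit p then '1' else '0') := by
      rw [hcalc, List.getElem!_eq_getElem?_getD,
        List.getElem?_reverse (by rw [hlen]; omega),
        getElem?_digsLE m _ (by omega), Option.getD_some, hlen, ← hpdef]
    have hmsb : m.testBit (L - 1) = true := msb_true m (by omega)
    have hg0' : (binChars m)[0]! = '1' := by rw [hg0, hmsb]; rfl
    have hparse : parseLE (digsLE m) = m := parseLE_digsLE m
    rw [if_neg hm0, if_neg (by omega : ¬ L = 1),
      if_pos (by omega : (binChars m).length ≥ 2), hclen, ← hidef]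
    by_cases hb : m.testBit p
    · -- middle bit is 1: A flips it to '0'; B subtracts 2^p
      have hgi' : (binChars m)[i]! = '1' := by rw [hgi, hb]; rfl
      rw [if_neg (by rw [hg0', hgi']; simp), hgi',
        if_neg (by decide : ¬ ('1' : Char) = '0'),
        if_pos ((shift_and_eq m p).mpr hb)]
      congr 1
      rw [hcalc, set_reverse (digsLE m) i '0' (by omega),
        parseBE_eq, List.reverse_reverse]
      have hrw : (digsLE m).length - 1 - i = p := by omega
      rw [hrw]
      have hplen : p < (digsLE m).length := by omega
      have hset := parseLE_set_to0 (digsLE m) p (by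
        rw [getElem?_digsLE m p hplen, hb]; rfl)
      have h2p : 2 ^ p ≤ m := testBit_ge m p hb
      rw [Nat.one_shiftLeft]
      omega
    · -- middle bit is 0: A swaps MSB and middle (the leading zero then drops); B clears the MSB and sets bit p
      have hgi' : (binChars m)[i]! = '0' := by rw [hgi, if_neg (by simpa using hb)]
      rw [if_pos (by rw [hg0', hgi']; decide), hgi', hg0',
        if_neg (by rw [shift_and_eq]; simp [hb])]
      congr 1
      rw [hcalc, set_reverse (digsLE m) 0 '0' (by omega)]
      have hr0 : (digsLE m).length - 1 - 0 = L - 1 := by omega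
      rw [hr0, set_reverse ((digsLE m).set (L - 1) '0') i '1'
        (by simp only [List.length_set]; omega)]
      have hri : ((digsLE m).set (L - 1) '0').length - 1 - i = p := by
        simp only [List.length_set]; omega
      rw [hri, parseBE_eq, List.reverse_reverse]
      have hmlen : L - 1 < (digsLE m).length := by omega
      have hplen : p < (digsLE m).length := by omega
      have hset1 := parseLE_set_to0 (digsLE m) (L - 1) (by
        rw [getElem?_digsLE m (L - 1) hmlen, hmsb]; rfl)
      have hset2 := parseLE_set_to1 ((digsLE m).set (L - 1) '0') p (by
        rw [List.getElem?_eq_getElem (by simp only [List.length_set]; omega),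
          List.getElem_set, if_neg (by omega)]
        have := getElem?_digsLE m p hplen
        rw [List.getElem?_eq_getElem hplen] at this
        rw [Option.some.injEq] at this
        rw [this, if_neg (by simpa using hb)])
      have hmsbge : 2 ^ (L - 1) ≤ m := testBit_ge m (L - 1) hmsb
      rw [Nat.one_shiftLeft, Nat.one_shiftLeft]
      omega

-- ===== VERDICT (by name: the statement is the Claim_ definition above) =====
theorem handleInt_spec : Claim_equal_handleInt := by
  intro num _
  unfold Spec_handleInt
  exact handleInt_eq_alt num
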